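-- pv_equiv track=rewrite | github.com/arafat1802/Compettitive-Programming | left-edge.py | left_edge_placement
-- ===== SOURCE A (Python) =====
-- def left_edge_placement(cell_widths, chip_width):
--     # Sort the cell widths in decreasing order
--     sorted_cells = sorted(cell_widths, reverse=True)
--
--     # Initialize an empty row for placement
--     row = [(0, 0)]  # Each tuple represents (cell_left, cell_right)
--
--     placements = {}  # Dictionary to store placements of cells
--
--     for cell_width in sorted_cells:
--         placed = False
--
--         for i, (cell_left, cell_right) in enumerate(row):
--             if cell_right + cell_width <= chip_width:
--                 # Place the cell in the current row
--                 cell_position = (cell_right, cell_right + cell_width)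
--                 placements[f'Cell{len(placements) + 1}'] = cell_position
--                 row[i] = cell_position
--
--                 # Update the flag to indicate successful placement
--                 placed = True
--                 break
--
--         if not placed:
--             # If the cell doesn't fit in any row, create a new row
--             row.append((0, cell_width))
--             placements[f'Cell{len(placements) + 1}'] = (0, cell_width)
--
--     return placements
-- ===== SOURCE B (Python) =====
-- # B: first-fit-decreasing shelf placement via an iterative min segment tree over
-- # the row right-edges: leftmost fitting row found by tree descent, point update.
-- INF = 1 << 62
--
-- def _pull(tree, i):
--     # recompute cached minima on the path from leaf i up to the root
--     while i > 1:
--         i >>= 1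
--         l = tree[i + i]
--         r = tree[i + i + 1]
--         tree[i] = l if l < r else r
--
-- def left_edge_placement(cell_widths, chip_width):
--     cells = sorted(cell_widths, reverse=True)
--     k = 0
--     while (1 << k) < len(cells) + 1:
--         k += 1
--     size = 1 << k
--     tree = [INF] * (2 * size)
--     tree[size] = 0           # row 0 exists with right edge 0
--     _pull(tree, size)
--     count = 1
--     placements = {}
--     for w in cells:
--         thr = chip_width - w
--         if tree[1] <= thr:
--             # descend to the leftmost leaf with right edge <= thr
--             i = 1
--             while i < size:
--                 i += i
--                 if tree[i] > thr:
--                     i += 1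
--             right = tree[i]
--         else:
--             i = size + count
--             count += 1
--             right = 0
--         placements['Cell%d' % (len(placements) + 1)] = (right, right + w)
--         tree[i] = right + w
--         _pull(tree, i)
--     return placements
-- ===== Notes on version B (the rewrite author's own statement) =====
-- stated objective: alternative
-- what changed: Replaces the inner linear scan over the rows with an iterative array min-segment-tree over the row right-edges: the leftmost fitting row is found by tree descent and its right edge is point-updated up the ancestor path.
import Mathlib
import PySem

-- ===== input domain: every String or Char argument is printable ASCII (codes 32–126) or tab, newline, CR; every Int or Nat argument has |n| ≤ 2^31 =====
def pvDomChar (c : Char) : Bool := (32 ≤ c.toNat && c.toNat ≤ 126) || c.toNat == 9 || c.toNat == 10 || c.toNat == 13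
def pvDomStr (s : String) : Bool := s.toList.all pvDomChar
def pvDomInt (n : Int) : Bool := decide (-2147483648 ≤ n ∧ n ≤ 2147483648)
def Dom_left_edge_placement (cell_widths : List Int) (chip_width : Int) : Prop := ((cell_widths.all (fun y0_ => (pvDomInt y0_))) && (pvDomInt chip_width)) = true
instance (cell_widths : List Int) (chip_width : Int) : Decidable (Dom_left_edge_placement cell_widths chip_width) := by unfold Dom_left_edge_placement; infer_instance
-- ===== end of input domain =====

-- B replaces A's inner linear scan over the rows with a min-segment-tree over the
-- row right-edges (leftmost fitting row found by descent, point update).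

-- ===== PORT A =====
-- inner 'for i, (cell_left, cell_right) in enumerate(row): … break' of A:
-- first row with cell_right + w ≤ W; returns the position and the updated row
def tryPlaceA (row : List (Int × Int)) (w W : Int) : Option ((Int × Int) × List (Int × Int)) :=
  match row with
  | [] => none
  | (cl, r) :: rest =>
    if r + w ≤ W then some ((r, r + w), (r, r + w) :: rest)
    else (tryPlaceA rest w W).map (fun pr => (pr.1, (cl, r) :: pr.2))

def loopA (W : Int) : List Int → List (Int × Int) → PySem.Dict String (Int × Int) → PySem.Dict String (Int × Int)
  | [], _, pl => pl
  | w :: ws, row, pl =>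
    match tryPlaceA row w W with
    | some pr => loopA W ws pr.2 (pl.insert ("Cell" ++ PySem.Int.toStr ((pl.size : Int) + 1)) pr.1)
    | none => loopA W ws (row ++ [(0, w)]) (pl.insert ("Cell" ++ PySem.Int.toStr ((pl.size : Int) + 1)) (0, w))

def left_edge_placement (cell_widths : List Int) (chip_width : Int) : List (String × Int × Int) :=
  (loopA chip_width (PySem.List.sorted cell_widths (fun x => x) true) [(0, 0)] PySem.Dict.empty).items

-- ===== PORT B =====
def pvINF : Int := 2 ^ 62

-- 'k = 0; while (1 << k) < len(cells) + 1: k += 1'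
def chooseK (n k : Nat) : Nat :=
  if 2 ^ k < n + 1 then chooseK n (k + 1) else k
termination_by n + 1 - 2 ^ k
decreasing_by
  have : 2 ^ k < 2 ^ (k + 1) := Nat.pow_lt_pow_succ (by omega)
  omega

-- '_pull': 'while i > 1: i >>= 1; l = tree[i+i]; r = tree[i+i+1]; tree[i] = l if l < r else r'
-- (fuel-counted loop: the caller passes fuel k, and from a leaf the Python loop runs exactly
--  k times; every index read/written is in range there, where Python's tree[i] is the same value)
def ascend : Nat → List Int → Nat → List Int × Nat
  | 0, a, i => (a, i)
  | f + 1, a, i =>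
    if 1 < i then
      let p := i / 2
      let l := a.getD (p + p) 0
      let r := a.getD (p + p + 1) 0
      ascend f (a.set p (if l < r then l else r)) p
    else (a, i)

-- descent 'i = 1; while i < size: i += i; if tree[i] > thr: i += 1' (fuel-counted: from i = 1
-- the Python loop runs exactly k times; all reads in range there, Python's tree[i] is the same)
def descend (a : List Int) (thr : Int) (size : Nat) : Nat → Nat → Nat
  | 0, i => i
  | f + 1, i =>
    if i < size then
      let i2 := i + i
      descend a thr size f (if a.getD i2 0 > thr then i2 + 1 else i2)
    else i

def loopB (W : Int) (size k : Nat) : List Int → List Int → Nat → PySem.Dict String (Int × Int) → PySem.Dict String (Int × Int)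
  | [], _, _, pl => pl
  | w :: ws, tr, count, pl =>
    let thr := W - w
    if tr.getD 1 0 ≤ thr then
      let i := descend tr thr size k 1
      let right := tr.getD i 0
      loopB W size k ws ((ascend k (tr.set i (right + w)) i).1) count
        (pl.insert ("Cell" ++ PySem.Int.toStr ((pl.size : Int) + 1)) (right, right + w))
    else
      let i := size + count
      loopB W size k ws ((ascend k (tr.set i ((0 : Int) + w)) i).1) (count + 1)
        (pl.insert ("Cell" ++ PySem.Int.toStr ((pl.size : Int) + 1)) ((0 : Int), (0 : Int) + w))

def left_edge_placement_alt (cell_widths : List Int) (chip_width : Int) : List (String × Int × Int) :=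
  let cells := PySem.List.sorted cell_widths (fun x => x) true
  let k := chooseK cells.length 0
  let size := 2 ^ k
  let tree0 := (List.replicate (2 * size) pvINF).set size 0   -- row 0 exists with right edge 0
  let tree1 := (ascend k tree0 size).1                        -- '_pull(tree, size)'
  (loopB chip_width size k cells tree1 1 PySem.Dict.empty).items

-- ===== PRECONDITION & SPEC =====
def Spec_left_edge_placement (cell_widths : List Int) (chip_width : Int) (out : List (String × Int × Int)) : Prop := out = left_edge_placement_alt cell_widths chip_width
instance (cell_widths : List Int) (chip_width : Int) (out : List (String × Int × Int)) : Decidable (Spec_left_edge_placement cell_widths chip_width out) := by unfold Spec_left_edge_placement; infer_instance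

-- ===== CLAIM (what is proved, stated in full; the proofs are below) =====
def Claim_equal_left_edge_placement : Prop := ∀ (cell_widths : List Int) (chip_width : Int), Dom_left_edge_placement cell_widths chip_width → Spec_left_edge_placement cell_widths chip_width (left_edge_placement cell_widths chip_width)

-- ===== LEMMAS AND PROOFS =====

-- proof-layer model of the heap array: a binary min-tree with cached minima
inductive STree where
  | leaf : Int → STree
  | node : Int → Nat → STree → STree → STree
deriving DecidableEq, Repr

def stMin : STree → Int
  | .leaf v => v
  | .node mn _ _ _ => mn

def stBuild : Nat → STree
  | 0 => .leaf pvINF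
  | k + 1 => .node pvINF (2 ^ k) (stBuild k) (stBuild k)

def stUpdate : STree → Nat → Int → STree
  | .leaf _, _, v => .leaf v
  | .node _ h l r, i, v =>
    if i < h then
      let l' := stUpdate l i v
      .node (min (stMin l') (stMin r)) h l' r
    else
      let r' := stUpdate r (i - h) v
      .node (min (stMin l) (stMin r')) h l r'

def leavesT : STree → List Int
  | .leaf v => [v]
  | .node _ _ l r => leavesT l ++ leavesT r

def WFT : STree → Prop
  | .leaf _ => True
  | .node mn h l r => WFT l ∧ WFT r ∧ mn = min (stMin l) (stMin r) ∧
      h = (leavesT l).length ∧ (leavesT r).length = (leavesT l).length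

-- the h-level subtree of the heap array 'a' rooted at heap index j
def readT : Nat → List Int → Nat → STree
  | 0, a, j => .leaf (a.getD j 0)
  | h + 1, a, j => .node (a.getD j 0) (2 ^ h) (readT h a (2 * j)) (readT h a (2 * j + 1))

-- first index (and value) of an element ≤ thr
def firstLE : List Int → Int → Option (Nat × Int)
  | [], _ => none
  | v :: vs, thr => if v ≤ thr then some (0, v) else (firstLE vs thr).map (fun p => (p.1 + 1, p.2))

lemma firstLE_append (a b : List Int) (thr : Int) :
    firstLE (a ++ b) thr =
      match firstLE a thr with
      | some p => some p
      | none => (firstLE b thr).map (fun p => (p.1 + a.length, p.2)) := by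
  induction a with
  | nil => cases h : firstLE b thr <;> simp [firstLE, h]
  | cons v vs ih =>
    simp only [List.cons_append, firstLE]
    split
    · rfl
    · rw [ih]
      cases h : firstLE vs thr with
      | some p => simp
      | none =>
        cases h2 : firstLE b thr with
        | none => simp
        | some q => simp [Nat.add_assoc]

lemma firstLE_none_of_forall {a : List Int} {thr : Int} (h : ∀ x ∈ a, thr < x) :
    firstLE a thr = none := by
  induction a with
  | nil => rfl
  | cons v vs ih =>
    have hv := h v (by simp)
    simp only [firstLE, if_neg (by omega : ¬ v ≤ thr)]
    rw [ih (fun x hx => h x (by simp [hx]))]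
    rfl

lemma firstLE_lt_length {a : List Int} {thr : Int} {p : Nat × Int}
    (h : firstLE a thr = some p) : p.1 < a.length := by
  induction a generalizing p with
  | nil => simp [firstLE] at h
  | cons v vs ih =>
    simp only [firstLE] at h
    split at h
    · cases h; simp
    · cases h2 : firstLE vs thr with
      | none => rw [h2] at h; cases h
      | some q =>
        rw [h2] at h
        cases h
        have := ih h2
        simp only [List.length_cons]
        omega

lemma firstLE_getD {a : List Int} {thr : Int} {p : Nat × Int}
    (h : firstLE a thr = some p) : a.getD p.1 0 = p.2 := by
  induction a generalizing p with
  | nil => simp [firstLE] at h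
  | cons v vs ih =>
    simp only [firstLE] at h
    split at h
    · cases h; simp
    · cases h2 : firstLE vs thr with
      | none => rw [h2] at h; cases h
      | some q =>
        rw [h2] at h
        cases h
        simpa using ih h2

lemma firstLE_isSome_of_mem {a : List Int} {thr x : Int} (hx : x ∈ a) (hle : x ≤ thr) :
    ∃ p, firstLE a thr = some p := by
  induction a with
  | nil => simp at hx
  | cons v vs ih =>
    simp only [firstLE]
    by_cases hv : v ≤ thr
    · exact ⟨_, by rw [if_pos hv]⟩
    · rw [if_neg hv]
      have hx' : x ∈ vs := by
        rcases List.mem_cons.mp hx with h | h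
        · omega
        · exact h
      obtain ⟨p, hp⟩ := ih hx'
      exact ⟨_, by rw [hp]; rfl⟩

lemma stMin_le_of_mem {t : STree} (hw : WFT t) {x : Int} (hx : x ∈ leavesT t) :
    stMin t ≤ x := by
  induction t with
  | leaf v => simp [leavesT] at hx; simp [hx, stMin]
  | node mn h l r ihl ihr =>
    obtain ⟨hwl, hwr, hmn, -, -⟩ := hw
    simp only [leavesT, List.mem_append] at hx
    simp only [stMin, hmn]
    rcases hx with hx | hx
    · exact le_trans (min_le_left _ _) (ihl hwl hx)
    · exact le_trans (min_le_right _ _) (ihr hwr hx)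

lemma stMin_mem {t : STree} (hw : WFT t) : stMin t ∈ leavesT t := by
  induction t with
  | leaf v => simp [leavesT, stMin]
  | node mn h l r ihl ihr =>
    obtain ⟨hwl, hwr, hmn, -, -⟩ := hw
    simp only [leavesT, List.mem_append, stMin, hmn]
    rcases min_cases (stMin l) (stMin r) with ⟨heq, -⟩ | ⟨heq, -⟩
    · exact Or.inl (heq ▸ ihl hwl)
    · exact Or.inr (heq ▸ ihr hwr)

lemma leavesT_length_update (t : STree) (i : Nat) (v : Int) :
    (leavesT (stUpdate t i v)).length = (leavesT t).length := by
  induction t generalizing i with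
  | leaf w => rfl
  | node mn h l r ihl ihr =>
    simp only [stUpdate]
    split <;> simp [leavesT, ihl, ihr]

lemma WFT_update {t : STree} (hw : WFT t) (i : Nat) (v : Int) :
    WFT (stUpdate t i v) := by
  induction t generalizing i with
  | leaf w => trivial
  | node mn h l r ihl ihr =>
    obtain ⟨hwl, hwr, hmn, hh, hlen⟩ := hw
    simp only [stUpdate]
    split
    · exact ⟨ihl hwl _, hwr, rfl, by rw [hh, leavesT_length_update], by rw [hlen, leavesT_length_update]⟩
    · exact ⟨hwl, ihr hwr _, rfl, hh, by rw [leavesT_length_update, hlen]⟩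

lemma leavesT_update {t : STree} (hw : WFT t) {i : Nat} (v : Int)
    (hi : i < (leavesT t).length) :
    leavesT (stUpdate t i v) = (leavesT t).set i v := by
  induction t generalizing i with
  | leaf w =>
    have h0 : i = 0 := by simp [leavesT] at hi; omega
    subst h0
    rfl
  | node mn h l r ihl ihr =>
    obtain ⟨hwl, hwr, hmn, hh, hlen⟩ := hw
    simp only [leavesT, List.length_append] at hi
    simp only [stUpdate]
    split
    · rename_i hih
      simp only [leavesT]
      rw [ihl hwl (by omega), List.set_append_left _ _ (by omega)]
    · rename_i hih
      simp only [leavesT]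
      rw [ihr hwr (by omega), List.set_append_right _ _ (by omega), hh]

lemma leavesT_build (k : Nat) : leavesT (stBuild k) = List.replicate (2 ^ k) pvINF := by
  induction k with
  | zero => rfl
  | succ k ih =>
    simp only [stBuild, leavesT, ih]
    rw [List.replicate_append_replicate]
    congr 1
    ring

lemma stMin_build (k : Nat) : stMin (stBuild k) = pvINF := by
  cases k <;> rfl

lemma WFT_build (k : Nat) : WFT (stBuild k) := by
  induction k with
  | zero => trivial
  | succ k ih =>
    exact ⟨ih, ih, by simp [stMin_build], by simp [leavesT_build], by simp [leavesT_build]⟩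

lemma chooseK_ge (n k : Nat) : n + 1 ≤ 2 ^ chooseK n k := by
  fun_induction chooseK n k with
  | case1 k h ih => exact ih
  | case2 k h => omega

lemma tryPlaceA_eq (row : List (Int × Int)) (w W : Int) :
    tryPlaceA row w W =
      (firstLE (row.map Prod.snd) (W - w)).map
        (fun p => ((p.2, p.2 + w), row.set p.1 (p.2, p.2 + w))) := by
  induction row with
  | nil => rfl
  | cons q rest ih =>
    obtain ⟨cl, r⟩ := q
    simp only [List.map_cons, tryPlaceA, firstLE]
    by_cases hfit : r + w ≤ W
    · rw [if_pos hfit, if_pos (by omega : r ≤ W - w)]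
      simp [List.set]
    · rw [if_neg hfit, if_neg (by omega : ¬ r ≤ W - w), ih]
      cases h2 : firstLE (rest.map Prod.snd) (W - w) with
      | none => simp
      | some p => simp [List.set]

-- ---- arithmetic of heap indices ----

lemma divp_le {q e j : Nat} (h : q / 2 ^ e = j) : j * 2 ^ e ≤ q := by
  subst h; exact Nat.div_mul_le_self q (2 ^ e)

lemma divp_lt {q e j : Nat} (h : q / 2 ^ e = j) : q < (j + 1) * 2 ^ e := by
  rw [← Nat.div_lt_iff_lt_mul (Nat.two_pow_pos e)]; omega

lemma divp_of {q e j : Nat} (hle : j * 2 ^ e ≤ q) (hlt : q < (j + 1) * 2 ^ e) : q / 2 ^ e = j :=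
  Nat.div_eq_of_lt_le hle hlt

lemma div_pow_add (m t s : Nat) : m / 2 ^ t / 2 ^ s = m / 2 ^ (t + s) := by
  rw [Nat.div_div_eq_div_mul, pow_add]

lemma div_pow_down {q s : Nat} (hs : 1 ≤ s) (c : Nat) (h : q / 2 ^ s = c) : c ≤ q / 2 := by
  subst h
  calc q / 2 ^ s ≤ q / 2 ^ 1 :=
        Nat.div_le_div_left (Nat.pow_le_pow_right (by omega) hs) (by positivity)
    _ = q / 2 := by norm_num

-- a node of the sibling subtree is never on the update path (ancestors of m)
lemma anc_ne {h t e q m j : Nat} (hj : 1 ≤ j) (hm : m / 2 ^ h = 2 * j)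
    (hq : q / 2 ^ e = 2 * j + 1) (_he : e ≤ h) (ht : t ≤ h) : q ≠ m / 2 ^ t := by
  intro hqe
  subst hqe
  have hht : m / 2 ^ t / 2 ^ (h - t) = 2 * j := by
    rw [div_pow_add, show t + (h - t) = h from by omega]; exact hm
  by_cases hcase : e ≤ h - t
  · have h1 : m / 2 ^ t / 2 ^ e / 2 ^ (h - t - e) = 2 * j := by
      rw [div_pow_add, show e + (h - t - e) = h - t from by omega]; exact hht
    rw [hq] at h1
    rcases Nat.eq_zero_or_pos (h - t - e) with h0 | h0
    · rw [h0] at h1; simp only [pow_zero, Nat.div_one] at h1; omega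
    · have := div_pow_down h0 _ h1
      omega
  · have h1 : m / 2 ^ t / 2 ^ (h - t) / 2 ^ (e - (h - t)) = 2 * j + 1 := by
      rw [div_pow_add, show (h - t) + (e - (h - t)) = e from by omega]; exact hq
    rw [hht] at h1
    have := div_pow_down (by omega : 1 ≤ e - (h - t)) _ h1
    omega

lemma anc_ne' {h t e q m j : Nat} (hj : 1 ≤ j) (hm : m / 2 ^ h = 2 * j + 1)
    (hq : q / 2 ^ e = 2 * j) (_he : e ≤ h) (ht : t ≤ h) : q ≠ m / 2 ^ t := by
  intro hqe
  subst hqe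
  have hht : m / 2 ^ t / 2 ^ (h - t) = 2 * j + 1 := by
    rw [div_pow_add, show t + (h - t) = h from by omega]; exact hm
  by_cases hcase : e ≤ h - t
  · have h1 : m / 2 ^ t / 2 ^ e / 2 ^ (h - t - e) = 2 * j + 1 := by
      rw [div_pow_add, show e + (h - t - e) = h - t from by omega]; exact hht
    rw [hq] at h1
    rcases Nat.eq_zero_or_pos (h - t - e) with h0 | h0
    · rw [h0] at h1; simp only [pow_zero, Nat.div_one] at h1; omega
    · have := div_pow_down h0 _ h1
      omega
  · have h1 : m / 2 ^ t / 2 ^ (h - t) / 2 ^ (e - (h - t)) = 2 * j := by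
      rw [div_pow_add, show (h - t) + (e - (h - t)) = e from by omega]; exact hq
    rw [hht] at h1
    have := div_pow_down (by omega : 1 ≤ e - (h - t)) _ h1
    omega

lemma sub_ne_root {q e j c : Nat} (hj : 1 ≤ j) (hc : c = 2 * j ∨ c = 2 * j + 1)
    (hq : q / 2 ^ e = c) : q ≠ j := by
  have h1 := divp_le hq
  have h2 : c ≤ c * 2 ^ e := Nat.le_mul_of_pos_right _ (Nat.two_pow_pos e)
  omega

-- ---- getD / set ----

lemma getD_set_ne (a : List Int) (p q : Nat) (v : Int) (h : q ≠ p) :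
    (a.set p v).getD q 0 = a.getD q 0 := by
  simp [List.getD, List.getElem?_set_ne h.symm]

lemma getD_set_self (a : List Int) (p : Nat) (v : Int) (h : p < a.length) :
    (a.set p v).getD p 0 = v := by
  simp [List.getD, h]

-- ---- readT ----

lemma stMin_readT (h : Nat) (a : List Int) (j : Nat) : stMin (readT h a j) = a.getD j 0 := by
  cases h <;> rfl

lemma readT_ext (h : Nat) : ∀ (j : Nat) (a b : List Int),
    (∀ e q, e ≤ h → q / 2 ^ e = j → a.getD q 0 = b.getD q 0) → readT h a j = readT h b j := by
  induction h with
  | zero =>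
    intro j a b hx
    simp only [readT]
    rw [hx 0 j (le_refl 0) (by simp)]
  | succ h ih =>
    intro j a b hx
    simp only [readT]
    rw [hx 0 j (by omega) (by simp),
      ih (2 * j) a b (fun e q he hq => hx (e + 1) q (by omega)
        (by rw [← div_pow_add, hq]; omega)),
      ih (2 * j + 1) a b (fun e q he hq => hx (e + 1) q (by omega)
        (by rw [← div_pow_add, hq]; omega))]

lemma readT_replicate (h : Nat) : ∀ (j N : Nat), 1 ≤ j → (j + 1) * 2 ^ h ≤ N →
    readT h (List.replicate N pvINF) j = stBuild h := by
  induction h with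
  | zero =>
    intro j N hj hN
    simp only [readT, stBuild]
    rw [List.getD_replicate _ (by omega : j < N)]
  | succ h ih =>
    intro j N hj hN
    have hh : 2 ^ (h + 1) = 2 ^ h + 2 ^ h := by rw [pow_succ]; ring
    have hexp : (2 * j + 1 + 1) * 2 ^ h = (j + 1) * 2 ^ (h + 1) := by ring
    have hexp2 : (2 * j + 1) * 2 ^ h ≤ (j + 1) * 2 ^ (h + 1) := by nlinarith [Nat.two_pow_pos h]
    have hjN : j < N := by nlinarith [Nat.two_pow_pos (h + 1)]
    simp only [readT, stBuild]
    rw [List.getD_replicate _ hjN,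
      ih (2 * j) N (by omega) (by omega),
      ih (2 * j + 1) N (by omega) (by omega)]

lemma leavesT_readT (h : Nat) : ∀ (j : Nat) (a : List Int),
    leavesT (readT h a j) = (List.range (2 ^ h)).map (fun x => a.getD (j * 2 ^ h + x) 0) := by
  induction h with
  | zero =>
    intro j a
    simp [readT, leavesT]
  | succ h ih =>
    intro j a
    have hh : 2 ^ (h + 1) = 2 ^ h + 2 ^ h := by rw [pow_succ]; ring
    simp only [readT, leavesT, ih, hh, List.range_add, List.map_append, List.map_map]
    congr 1
    · apply List.map_congr_left
      intro x hx
      congr 1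
      ring
    · apply List.map_congr_left
      intro x hx
      simp only [Function.comp_apply]
      congr 1
      ring

lemma length_leavesT_readT (h : Nat) (a : List Int) (j : Nat) :
    (leavesT (readT h a j)).length = 2 ^ h := by
  simp [leavesT_readT]

-- ---- ascend ----

lemma ascend_stop (f : Nat) (a : List Int) (i : Nat) (h : ¬ 1 < i) : ascend f a i = (a, i) := by
  cases f with
  | zero => rfl
  | succ f => simp only [ascend, if_neg h]

lemma ascend_add (f g : Nat) : ∀ (a : List Int) (i : Nat),
    ascend (f + g) a i = ascend g (ascend f a i).1 (ascend f a i).2 := by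
  induction f with
  | zero => intro a i; simp [ascend]
  | succ f ih =>
    intro a i
    rw [show f + 1 + g = (f + g) + 1 from by omega]
    simp only [ascend]
    split
    · exact ih _ _
    · rename_i hni
      rw [ascend_stop g a i hni]

lemma ascend_length (f : Nat) : ∀ (a : List Int) (i : Nat), (ascend f a i).1.length = a.length := by
  induction f with
  | zero => intro a i; rfl
  | succ f ih =>
    intro a i
    simp only [ascend]
    split
    · rw [ih]; simp
    · rfl

lemma ite_lt_min (l r : Int) : (if l < r then l else r) = min l r := by
  rcases min_cases l r with ⟨h1, h2⟩ | ⟨h1, h2⟩ <;> (rw [h1]; split <;> omega)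

lemma ascend_spec (h : Nat) : ∀ (m : Nat) (v : Int) (a : List Int),
    1 ≤ m / 2 ^ h → m < a.length →
    (ascend h (a.set m v) m).2 = m / 2 ^ h ∧
    readT h (ascend h (a.set m v) m).1 (m / 2 ^ h) =
      stUpdate (readT h a (m / 2 ^ h)) (m - (m / 2 ^ h) * 2 ^ h) v ∧
    (∀ p, (∀ t, t ≤ h → p ≠ m / 2 ^ t) → (ascend h (a.set m v) m).1.getD p 0 = a.getD p 0) := by
  induction h with
  | zero =>
    intro m v a h1 hlen
    refine ⟨by simp [ascend], ?_, ?_⟩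
    · simp only [ascend, pow_zero, Nat.div_one, Nat.mul_one, Nat.sub_self, readT, stUpdate]
      rw [getD_set_self a m v hlen]
    · intro p hp
      exact getD_set_ne a m p v (by simpa using hp 0 (by omega))
  | succ h ih =>
    intro m v a h1 hlen
    set j := m / 2 ^ (h + 1) with hj
    have hcj : (m / 2 ^ h) / 2 = j := by
      rw [hj, ← div_pow_add m h 1]; norm_num
    set c := m / 2 ^ h with hc
    clear_value j c
    have hc2 : 2 ≤ c := by omega
    obtain ⟨hs2, hsr, hsoff⟩ := ih m v a (by omega) hlen
    rw [← hc] at hs2 hsr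
    set s := ascend h (a.set m v) m with hs
    have hsplit : ascend (h + 1) (a.set m v) m = ascend 1 s.1 s.2 := ascend_add h 1 _ _
    have hslen : s.1.length = a.length := by
      rw [hs, ascend_length]; simp
    clear_value s
    have hjlen : j < a.length := by
      have hjm : j ≤ m := by rw [hj]; exact Nat.div_le_self _ _
      omega
    have hj1 : 1 ≤ j := h1
    have hone : ascend 1 s.1 c =
        (s.1.set (c / 2) (if s.1.getD (c / 2 + (c / 2)) 0 < s.1.getD (c / 2 + (c / 2) + 1) 0
          then s.1.getD (c / 2 + (c / 2)) 0 else s.1.getD (c / 2 + (c / 2) + 1) 0), c / 2) := by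
      simp only [ascend, if_pos (by omega : 1 < c)]
    rw [hsplit, hs2, hone, hcj]
    have hcase : c = 2 * j ∨ c = 2 * j + 1 := by omega
    -- facts reused below
    have hLfix : ∀ (X : Int), readT h (s.1.set j X) (2 * j) = readT h s.1 (2 * j) := fun X =>
      readT_ext h (2 * j) _ s.1
        (fun e q _ hq => getD_set_ne _ _ _ _ (sub_ne_root hj1 (Or.inl rfl) hq))
    have hRfix : ∀ (X : Int), readT h (s.1.set j X) (2 * j + 1) = readT h s.1 (2 * j + 1) := fun X =>
      readT_ext h (2 * j + 1) _ s.1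
        (fun e q _ hq => getD_set_ne _ _ _ _ (sub_ne_root hj1 (Or.inr rfl) hq))
    refine ⟨rfl, ?_, ?_⟩
    · -- the tree equality
      simp only [readT]
      rcases hcase with hcc | hcc
      · -- m is under the left child 2*j
        have hmul : j * 2 ^ (h + 1) = c * 2 ^ h := by rw [hcc, pow_succ]; ring
        have hi_lt : m - j * 2 ^ (h + 1) < 2 ^ h := by
          rw [hmul]
          have hg0 : 0 < 2 ^ h := Nat.two_pow_pos h
          have h5 := divp_lt hc.symm
          have h6 : (c + 1) * 2 ^ h = c * 2 ^ h + 2 ^ h := by ring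
          omega
        have hidx : m - j * 2 ^ (h + 1) = m - c * 2 ^ h := by rw [hmul]
        have hsib : readT h s.1 (2 * j + 1) = readT h a (2 * j + 1) :=
          readT_ext h (2 * j + 1) s.1 a
            (fun e q he hq => hsoff q (fun t ht => anc_ne hj1 (hcc ▸ hc.symm) hq he ht))
        simp only [stUpdate, if_pos hi_lt]
        have hLs : readT h s.1 (2 * j) = stUpdate (readT h a (2 * j)) (m - j * 2 ^ (h + 1)) v := by
          rw [show 2 * j = c from hcc.symm, hidx]
          exact hsr
        congr 1
        · -- the recomputed cached minimum
          rw [getD_set_self s.1 j _ (by rw [hslen]; exact hjlen), ite_lt_min]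
          congr 1
          · rw [show j + j = 2 * j from by ring, ← stMin_readT h s.1 (2 * j), hLs]
          · rw [show j + j + 1 = 2 * j + 1 from by ring, ← stMin_readT h s.1 (2 * j + 1), hsib]
        · rw [hLfix, hLs]
        · rw [hRfix, hsib]
      · -- m is under the right child 2*j + 1
        have hmul : j * 2 ^ (h + 1) + 2 ^ h = c * 2 ^ h := by rw [hcc, pow_succ]; ring
        have hge : ¬ (m - j * 2 ^ (h + 1) < 2 ^ h) := by
          have hg0 : 0 < 2 ^ h := Nat.two_pow_pos h
          have h5 := divp_le hc.symm
          have h3 : j * 2 ^ (h + 1) ≤ m := by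
            have h4 := divp_le hj.symm
            omega
          omega
        have hidx : m - j * 2 ^ (h + 1) - 2 ^ h = m - c * 2 ^ h := by
          have hg0 : 0 < 2 ^ h := Nat.two_pow_pos h
          have h5 := divp_le hc.symm
          have h3 : j * 2 ^ (h + 1) ≤ m := by
            have h4 := divp_le hj.symm
            omega
          omega
        have hsib : readT h s.1 (2 * j) = readT h a (2 * j) :=
          readT_ext h (2 * j) s.1 a
            (fun e q he hq => hsoff q (fun t ht => anc_ne' hj1 (hcc ▸ hc.symm) hq he ht))
        simp only [stUpdate, if_neg hge]
        have hRs : readT h s.1 (2 * j + 1) =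
            stUpdate (readT h a (2 * j + 1)) (m - j * 2 ^ (h + 1) - 2 ^ h) v := by
          rw [show 2 * j + 1 = c from hcc.symm, hidx]
          exact hsr
        congr 1
        · rw [getD_set_self s.1 j _ (by rw [hslen]; exact hjlen), ite_lt_min]
          congr 1
          · rw [show j + j = 2 * j from by ring, ← stMin_readT h s.1 (2 * j), hsib]
          · rw [show j + j + 1 = 2 * j + 1 from by ring, ← stMin_readT h s.1 (2 * j + 1), hRs]
        · rw [hLfix, hsib]
        · rw [hRfix, hRs]
    · intro p hp
      rw [getD_set_ne s.1 j p _ (by rw [hj]; exact hp (h + 1) (le_refl _)),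
        hsoff p (fun t ht => hp t (by omega))]

-- ---- descend ----

lemma descend_spec (h : Nat) : ∀ (f d j idx : Nat) (a : List Int) (thr v : Int),
    h ≤ f → 2 ^ d ≤ j → j < 2 ^ (d + 1) →
    WFT (readT h a j) → firstLE (leavesT (readT h a j)) thr = some (idx, v) →
    descend a thr (2 ^ (d + h)) f j = j * 2 ^ h + idx := by
  induction h with
  | zero =>
    intro f d j idx a thr v hf hj1 hj2 hw hfl
    have hidx0 : idx = 0 := by
      have := firstLE_lt_length hfl
      simp only [length_leavesT_readT, pow_zero] at this
      omega
    subst hidx0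
    cases f with
    | zero => simp [descend]
    | succ f =>
      simp only [descend, Nat.add_zero, if_neg (by omega : ¬ j < 2 ^ d)]
      omega
  | succ h ih =>
    intro f d j idx a thr v hf hj1 hj2 hw hfl
    cases f with
    | zero => omega
    | succ f =>
      have hguard : j < 2 ^ (d + (h + 1)) := by
        calc j < 2 ^ (d + 1) := hj2
          _ ≤ 2 ^ (d + (h + 1)) := Nat.pow_le_pow_right (by omega) (by omega)
      simp only [descend, if_pos hguard]
      simp only [readT, WFT] at hw hfl
      obtain ⟨hwl, hwr, -, -, -⟩ := hw
      simp only [leavesT] at hfl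
      rw [firstLE_append] at hfl
      have hminl : stMin (readT h a (2 * j)) = a.getD (2 * j) 0 := stMin_readT h a (2 * j)
      have hjj : j + j = 2 * j := by ring
      rw [hjj]
      by_cases hgt : a.getD (2 * j) 0 > thr
      · -- left subtree all above thr: go right
        rw [if_pos hgt]
        have hnone : firstLE (leavesT (readT h a (2 * j))) thr = none := by
          apply firstLE_none_of_forall
          intro x hx
          have h5 := stMin_le_of_mem hwl hx
          rw [hminl] at h5
          omega
        rw [hnone] at hfl
        cases hfr : firstLE (leavesT (readT h a (2 * j + 1))) thr with
        | none => rw [hfr] at hfl; simp at hfl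
        | some pr =>
          rw [hfr] at hfl
          have hfl2 : pr.1 + (leavesT (readT h a (2 * j))).length = idx ∧ pr.2 = v := by
            simpa using hfl
          have hrec := ih f (d + 1) (2 * j + 1) pr.1 a thr pr.2 (by omega)
            (by rw [pow_succ]; omega) (by rw [show d + 1 + 1 = d + 1 + 1 from rfl, pow_succ]; omega)
            hwr (by rw [hfr])
          rw [show d + (h + 1) = (d + 1) + h from by omega, hrec]
          rw [length_leavesT_readT] at hfl2
          have := hfl2.1
          ring_nf
          omega
      · -- left subtree has an element ≤ thr: go left
        rw [if_neg hgt]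
        have hmem := stMin_mem hwl
        obtain ⟨pl, hpl⟩ := firstLE_isSome_of_mem (thr := thr) hmem (by rw [hminl]; omega)
        rw [hpl] at hfl
        have hfl0 : pl = (idx, v) := by simpa using hfl
        have hfl2 : pl.1 = idx ∧ pl.2 = v := by rw [hfl0]; exact ⟨rfl, rfl⟩
        have hrec := ih f (d + 1) (2 * j) pl.1 a thr pl.2 (by omega)
          (by rw [pow_succ]; omega) (by rw [show d + 1 + 1 = d + 1 + 1 from rfl, pow_succ]; omega)
          hwl (by rw [hpl])
        rw [show d + (h + 1) = (d + 1) + h from by omega, hrec]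
        have := hfl2.1
        ring_nf
        omega

-- ---- the main loop ----

lemma loop_eq (W : Int) (k : Nat) : ∀ (ws : List Int) (row : List (Int × Int)) (tr : List Int)
    (count : Nat) (pl : PySem.Dict String (Int × Int)),
    tr.length = 2 ^ (k + 1) →
    WFT (readT k tr 1) →
    leavesT (readT k tr 1) = row.map Prod.snd ++ List.replicate (2 ^ k - row.length) pvINF →
    count = row.length →
    row.length + ws.length ≤ 2 ^ k →
    (∀ w ∈ ws, W - w < pvINF) →
    loopA W ws row pl = loopB W (2 ^ k) k ws tr count pl := by
  intro ws
  induction ws with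
  | nil => intro row tr count pl _ _ _ _ _ _; rfl
  | cons w ws ih =>
    intro row tr count pl hlen hw hlv hc hrow hdom
    simp only [List.length_cons] at hrow
    have hrl : row.length < 2 ^ k := by omega
    have hINF : W - w < pvINF := hdom w (by simp)
    have hleavlen : (leavesT (readT k tr 1)).length = 2 ^ k := length_leavesT_readT k tr 1
    have hfl_eq : firstLE (leavesT (readT k tr 1)) (W - w) = firstLE (row.map Prod.snd) (W - w) := by
      have hrepn : firstLE (List.replicate (2 ^ k - row.length) pvINF) (W - w) = none :=
        firstLE_none_of_forall (fun x hx => by rw [List.eq_of_mem_replicate hx]; exact hINF)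
      rw [hlv, firstLE_append, hrepn]
      cases hfl : firstLE (row.map Prod.snd) (W - w) <;> simp
    have htr1 : tr.getD 1 0 = stMin (readT k tr 1) := (stMin_readT k tr 1).symm
    simp only [loopA, loopB, tryPlaceA_eq]
    by_cases hg : tr.getD 1 0 ≤ W - w
    · rw [if_pos hg]
      -- some row fits: the minimum right edge is itself ≤ thr
      obtain ⟨p, hp⟩ := firstLE_isSome_of_mem (thr := W - w) (stMin_mem hw) (by rw [← htr1]; exact hg)
      have hpr : firstLE (row.map Prod.snd) (W - w) = some p := by rw [← hfl_eq, hp]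
      have hplt : p.1 < row.length := by
        have := firstLE_lt_length hpr
        simpa using this
      have hpidx : p.1 < 2 ^ k := by omega
      -- the descent lands on leaf 2^k + p.1 and reads back p.2
      have hdesc : descend tr (W - w) (2 ^ k) k 1 = 2 ^ k + p.1 := by
        have := descend_spec k k 0 1 p.1 tr (W - w) p.2 (le_refl k) (by norm_num) (by norm_num)
          hw (by rw [hp])
        rw [show (0 : Nat) + k = k from by omega] at this
        rw [this]; ring
      have hread : tr.getD (2 ^ k + p.1) 0 = p.2 := by
        have h1 := firstLE_getD hp
        rw [leavesT_readT] at h1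
        rw [List.getD_eq_getElem _ _ (by simpa using hpidx), List.getElem_map,
          List.getElem_range] at h1
        simpa using h1
      rw [hpr]
      simp only [Option.map_some, hdesc, hread]
      -- now both sides take one step; apply the induction hypothesis
      have hm1 : (2 ^ k + p.1) / 2 ^ k = 1 := divp_of (by omega) (by omega)
      have hmlt : 2 ^ k + p.1 < tr.length := by
        rw [hlen, pow_succ]; omega
      obtain ⟨-, hup, -⟩ := ascend_spec k (2 ^ k + p.1) (p.2 + w) tr (by omega) hmlt
      rw [hm1] at hup
      apply ih
      · rw [ascend_length]; simp [hlen]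
      · rw [hup]; exact WFT_update hw _ _
      · rw [hup, show 2 ^ k + p.1 - 1 * 2 ^ k = p.1 from by omega,
          leavesT_update hw _ (by omega)]
        conv_lhs => rw [hlv]
        rw [List.set_append_left _ _ (by simpa using hplt), List.map_set]
        simp
      · simp [hc]
      · simp only [List.length_set]; omega
      · exact fun x hx => hdom x (by simp [hx])
    · rw [if_neg hg]
      -- no row fits
      have hnone : firstLE (row.map Prod.snd) (W - w) = none := by
        rw [← hfl_eq]
        apply firstLE_none_of_forall
        intro x hx
        have := stMin_le_of_mem hw hx
        rw [← htr1] at this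
        omega
      rw [hnone]
      simp only [Option.map_none, zero_add]
      have hm1 : (2 ^ k + count) / 2 ^ k = 1 := by
        apply divp_of <;> omega
      have hmlt : 2 ^ k + count < tr.length := by
        rw [hlen, pow_succ]; omega
      obtain ⟨-, hup, -⟩ := ascend_spec k (2 ^ k + count) w tr (by omega) hmlt
      rw [hm1] at hup
      apply ih
      · rw [ascend_length]; simp [hlen]
      · rw [hup]; exact WFT_update hw _ _
      · rw [hup, show 2 ^ k + count - 1 * 2 ^ k = count from by omega, hc,
          leavesT_update hw _ (by omega)]
        obtain ⟨m, hm⟩ : ∃ m, 2 ^ k - row.length = m + 1 := ⟨2 ^ k - row.length - 1, by omega⟩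
        conv_lhs => rw [hlv, hm]
        rw [List.set_append_right _ _ (by simp)]
        simp only [List.length_map, Nat.sub_self, List.replicate_succ, List.set_cons_zero,
          List.map_append, List.map_cons, List.map_nil, List.append_assoc, List.cons_append,
          List.nil_append, List.length_append, List.length_cons, List.length_nil]
        rw [show 2 ^ k - (row.length + (0 + 1)) = m from by omega]
      · simp [hc]
      · simp only [List.length_append, List.length_cons, List.length_nil]; omega
      · exact fun x hx => hdom x (by simp [hx])

-- ===== VERDICT (by name: the statement is the Claim_ definition above) =====
theorem left_edge_placement_spec : Claim_equal_left_edge_placement := by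
  intro cw W hdom
  unfold Spec_left_edge_placement
  simp only [left_edge_placement, left_edge_placement_alt]
  congr 1
  set cells := PySem.List.sorted cw (fun x => x) true with hcells
  set k := chooseK cells.length 0 with hk
  have hk1 : cells.length + 1 ≤ 2 ^ k := chooseK_ge cells.length 0
  have hpos : 0 < 2 ^ k := Nat.two_pow_pos k
  have hrep : (List.replicate (2 * 2 ^ k) pvINF).length = 2 ^ (k + 1) := by
    simp [pow_succ]; ring
  have hm1 : (2 ^ k) / 2 ^ k = 1 := by
    apply divp_of <;> omega
  have hmlt : 2 ^ k < (List.replicate (2 * 2 ^ k) pvINF).length := by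
    rw [hrep, pow_succ]; omega
  obtain ⟨-, hup, -⟩ := ascend_spec k (2 ^ k) 0 (List.replicate (2 * 2 ^ k) pvINF) (by omega) hmlt
  rw [hm1] at hup
  have hbuild : readT k (List.replicate (2 * 2 ^ k) pvINF) 1 = stBuild k := by
    exact readT_replicate k 1 (2 * 2 ^ k) (by omega) (by omega)
  rw [hbuild, show 2 ^ k - 1 * 2 ^ k = 0 from by omega] at hup
  apply loop_eq
  · rw [ascend_length]; simp [pow_succ]; ring
  · rw [hup]; exact WFT_update (WFT_build k) _ _
  · rw [hup, leavesT_update (WFT_build k) _ (by rw [leavesT_build, List.length_replicate]; omega),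
      leavesT_build]
    obtain ⟨m, hm⟩ : ∃ m, 2 ^ k = m + 1 := ⟨2 ^ k - 1, by omega⟩
    rw [hm]
    simp [List.replicate_succ]
  · rfl
  · simp only [List.length_cons, List.length_nil]
    omega
  · intro w hw
    have hmem : w ∈ cw := (PySem.List.mem_sorted cw (fun x => x) true w).mp hw
    unfold Dom_left_edge_placement at hdom
    simp only [Bool.and_eq_true, List.all_eq_true, pvDomInt, decide_eq_true_eq] at hdom
    have h1 := hdom.1 w hmem
    have h2 := hdom.2
    have hE : pvINF = 4611686018427387904 := by norm_num [pvINF]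
    rw [hE]
    omega
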